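-- pv_equiv track=rewrite | github.com/NoobyNull/Digital-Workshop | src/core/services/library_structure_detector.py | _detect_naming_patterns
-- ===== SOURCE A (Python) =====
-- from typing import Dict, List
--
-- def _detect_naming_patterns(folders: set) -> List[str]:
--     """Detect naming patterns in folder names."""
--     patterns = []
--
--     if not folders:
--         return patterns
--
--     # Check for common patterns
--     folder_names = [f.lower() for f in folders]
--
--     # File type patterns
--     if any(name in folder_names for name in ["stl", "obj", "step", "models", "3d"]):
--         patterns.append("File type grouping")
--
--     # Category patterns
--     if any(
--         name in folder_names
--         for name in ["characters", "buildings", "vehicles", "nature", "objects"]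
--     ):
--         patterns.append("Category organization")
--
--     # Date patterns
--     if any(
--         name for name in folder_names if name.startswith("20") and len(name) == 4
--     ):
--         patterns.append("Date-based organization")
--
--     # Numbered patterns
--     if any(name[0].isdigit() for name in folder_names if name):
--         patterns.append("Numbered organization")
--
--     return patterns
-- ===== SOURCE B (Python) =====
-- from typing import Dict, List
--
-- def _detect_naming_patterns(folders: set) -> List[str]:
--     """Single pass over the folder names collecting four flags, then emit labels."""
--     FILETYPE = {"stl", "obj", "step", "models", "3d"}
--     CATEGORY = {"characters", "buildings", "vehicles", "nature", "objects"}
--     has_ft = has_cat = has_date = has_num = False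
--     for f in folders:
--         n = f.lower()
--         if n in FILETYPE:
--             has_ft = True
--         if n in CATEGORY:
--             has_cat = True
--         if n.startswith("20") and len(n) == 4:
--             has_date = True
--         if n and n[0].isdigit():
--             has_num = True
--     out = []
--     if has_ft:
--         out.append("File type grouping")
--     if has_cat:
--         out.append("Category organization")
--     if has_date:
--         out.append("Date-based organization")
--     if has_num:
--         out.append("Numbered organization")
--     return out
-- ===== Notes on version B (the rewrite author's own statement) =====
-- stated objective: alternative
-- what changed: A builds the lowercased name list and scans it four separate times (two of them keyword-outer membership scans); B makes a single pass over the folders, lowercasing inline and collecting four boolean flags, then emits the labels in the fixed order.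
import Mathlib
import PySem

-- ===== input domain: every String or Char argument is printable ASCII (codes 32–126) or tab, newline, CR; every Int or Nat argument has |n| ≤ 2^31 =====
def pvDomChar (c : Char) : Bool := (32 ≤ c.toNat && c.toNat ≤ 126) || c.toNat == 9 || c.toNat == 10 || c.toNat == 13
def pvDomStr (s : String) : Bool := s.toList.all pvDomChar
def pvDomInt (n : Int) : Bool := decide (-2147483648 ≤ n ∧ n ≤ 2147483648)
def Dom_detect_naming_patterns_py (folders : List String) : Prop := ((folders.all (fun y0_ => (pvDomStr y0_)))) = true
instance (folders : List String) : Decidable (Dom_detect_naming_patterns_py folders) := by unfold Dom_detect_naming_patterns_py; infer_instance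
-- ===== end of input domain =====

-- B replaces A's four separate scans of the name list by one fold collecting four flags (alternative decomposition, same cost).

-- ===== PORT A =====
-- A: four `any(...)` scans over the lowercased name list, appending a label after each.
def detect_naming_patterns_py (folders : List String) : List String :=
  if folders = [] then []
  else
    let folder_names := folders.map (fun f => PySem.Str.lower f)
    let patterns : List String := []
    let patterns := if ["stl", "obj", "step", "models", "3d"].any
        (fun name => folder_names.contains name) then patterns ++ ["File type grouping"] else patterns
    let patterns := if ["characters", "buildings", "vehicles", "nature", "objects"].any
        (fun name => folder_names.contains name) then patterns ++ ["Category organization"] else patterns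
    let patterns := if folder_names.any
        (fun name => PySem.Str.startswith name "20" && (PySem.Str.len name == 4))
        then patterns ++ ["Date-based organization"] else patterns
    -- `any(name[0].isdigit() for name in folder_names if name)`: the `if name` guard makes name[0] total
    let patterns := if (folder_names.filter (fun name => !(name == ""))).any
        (fun name => match PySem.Str.pyGet? name 0 with
                     | some c => PySem.Chars.isdigit c
                     | none => false)
        then patterns ++ ["Numbered organization"] else patterns
    patterns

-- ===== PORT B =====
def pvStepB (fl : Bool × Bool × Bool × Bool) (f : String) : Bool × Bool × Bool × Bool :=
  let n := PySem.Str.lower f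
  let ft := fl.1 || ["stl", "obj", "step", "models", "3d"].contains n
  let cat := fl.2.1 || ["characters", "buildings", "vehicles", "nature", "objects"].contains n
  let dt := fl.2.2.1 || (PySem.Str.startswith n "20" && (PySem.Str.len n == 4))
  let num := fl.2.2.2 || (!(n == "") && (match n.toList with
                                         | c :: _ => PySem.Chars.isdigit c
                                         | [] => false))
  (ft, cat, dt, num)

def detect_naming_patterns_py_alt (folders : List String) : List String :=
  let fl := folders.foldl pvStepB (false, false, false, false)
  (if fl.1 then ["File type grouping"] else []) ++
  (if fl.2.1 then ["Category organization"] else []) ++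
  (if fl.2.2.1 then ["Date-based organization"] else []) ++
  (if fl.2.2.2 then ["Numbered organization"] else [])

-- ===== PRECONDITION & SPEC =====
def Spec_detect_naming_patterns_py (folders : List String) (out : List String) : Prop := out = detect_naming_patterns_py_alt folders
instance (folders : List String) (out : List String) : Decidable (Spec_detect_naming_patterns_py folders out) := by unfold Spec_detect_naming_patterns_py; infer_instance

-- ===== CLAIM (what is proved, stated in full; the proofs are below) =====
def Claim_equal_detect_naming_patterns_py : Prop := ∀ (folders : List String), Dom_detect_naming_patterns_py folders → Spec_detect_naming_patterns_py folders (detect_naming_patterns_py folders)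

-- ===== LEMMAS AND PROOFS =====

def pvQ1 (f : String) : Bool := ["stl", "obj", "step", "models", "3d"].contains (PySem.Str.lower f)
def pvQ2 (f : String) : Bool := ["characters", "buildings", "vehicles", "nature", "objects"].contains (PySem.Str.lower f)
def pvQ3 (f : String) : Bool := PySem.Str.startswith (PySem.Str.lower f) "20" && (PySem.Str.len (PySem.Str.lower f) == 4)
def pvQ4 (f : String) : Bool := !(PySem.Str.lower f == "") && (match (PySem.Str.lower f).toList with
                                                              | c :: _ => PySem.Chars.isdigit c
                                                              | [] => false)

theorem pvFoldB (l : List String) (init : Bool × Bool × Bool × Bool) :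
    l.foldl pvStepB init =
      (init.1 || l.any pvQ1, init.2.1 || l.any pvQ2, init.2.2.1 || l.any pvQ3, init.2.2.2 || l.any pvQ4) := by
  induction l generalizing init with
  | nil => simp
  | cons x xs ih =>
    obtain ⟨a, b, c, d⟩ := init
    simp [List.foldl_cons, ih, pvStepB, pvQ1, pvQ2, pvQ3, pvQ4, Bool.or_assoc]

theorem pvSwapAny (K names : List String) :
    K.any (fun k => names.contains k) = names.any (fun n => K.contains n) := by
  rcases h : names.any (fun n => K.contains n) with _ | _
  · simp only [List.any_eq_false] at h ⊢
    intro k hk hc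
    simp only [List.contains_iff_exists_mem_beq] at hc
    obtain ⟨n, hn, hbeq⟩ := hc
    have := h n hn
    simp only [List.contains_iff_exists_mem_beq] at this
    exact this ⟨k, hk, BEq.symm hbeq⟩
  · simp only [List.any_eq_true] at h ⊢
    obtain ⟨n, hn, hc⟩ := h
    simp only [List.contains_iff_exists_mem_beq] at hc ⊢
    obtain ⟨k, hk, hbeq⟩ := hc
    exact ⟨k, hk, n, hn, BEq.symm hbeq⟩

theorem pvCond4 (names : List String) :
    (names.filter (fun name => !(name == ""))).any
        (fun name => match PySem.Str.pyGet? name 0 with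
                     | some c => PySem.Chars.isdigit c
                     | none => false)
      = names.any (fun n => !(n == "") && (match n.toList with
                                           | c :: _ => PySem.Chars.isdigit c
                                           | [] => false)) := by
  rw [List.any_filter]
  congr 1
  funext n
  rcases hn : n.toList with _ | ⟨c, cs⟩ <;>
    simp [PySem.Str.pyGet?_eq, PySem.Chars.pyGet?_eq_listPyGet?, hn, PySem.List.pyGet?,
      PySem.List.pyIdx?]

-- ===== VERDICT (by name: the statement is the Claim_ definition above) =====
theorem detect_naming_patterns_py_spec : Claim_equal_detect_naming_patterns_py := by
  intro folders _
  unfold Spec_detect_naming_patterns_py detect_naming_patterns_py detect_naming_patterns_py_alt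
  rw [pvFoldB]
  have h1 : (["stl", "obj", "step", "models", "3d"] : List String).any
      (fun name => (folders.map (fun f => PySem.Str.lower f)).contains name) = folders.any pvQ1 := by
    rw [pvSwapAny, List.any_map]; rfl
  have h2 : (["characters", "buildings", "vehicles", "nature", "objects"] : List String).any
      (fun name => (folders.map (fun f => PySem.Str.lower f)).contains name) = folders.any pvQ2 := by
    rw [pvSwapAny, List.any_map]; rfl
  have h3 : (folders.map (fun f => PySem.Str.lower f)).any
      (fun name => PySem.Str.startswith name "20" && (PySem.Str.len name == 4)) = folders.any pvQ3 := by
    rw [List.any_map]; rfl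
  have h4 : ((folders.map (fun f => PySem.Str.lower f)).filter (fun name => !(name == ""))).any
      (fun name => match PySem.Str.pyGet? name 0 with
                   | some c => PySem.Chars.isdigit c
                   | none => false) = folders.any pvQ4 := by
    rw [pvCond4, List.any_map]; rfl
  by_cases hf : folders = []
  · subst hf; rfl
  · simp only [if_neg hf, h1, h2, h3, h4, Bool.false_or]
    split_ifs <;> rfl
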